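-- pv_equiv track=rewrite | github.com/DavidDuncker/FultonCountyBallotScanner | compile_ballot_data/turn_sql_into_data.py | read_race_data
-- ===== SOURCE A (Python) =====
-- def read_race_data(text, list_of_races):
--     race_data = {}
--
--     #Remove information about adjudication if necessary
--     text_lower = text.lower()
--     if "adjudicated" in text_lower:
--         bookmark = text_lower.find("adjudicated")
--         text = text[:bookmark]
--
--     lines = text.split("\n")
--
--     for line_index in range(0, len(lines)):
--         for race in list_of_races:
--             race_sanitized = race.replace("5", "S").replace("0", "O").replace("1", "l").replace("8", "B")
--             race_sanitized = ''.join(filter(str.isalnum, race_sanitized))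
--             line_sanitized = lines[line_index].replace("5", "S").replace("0", "O").replace("1", "l").replace("8", "B")
--             line_sanitized = ''.join(filter(str.isalnum, line_sanitized))
--             if line_sanitized == race_sanitized:
--                 race_data[race] = lines[line_index+1][:6]
--
--     return race_data
-- ===== SOURCE B (Python) =====
-- def _sanitize(s):
--     s = s.replace("5", "S").replace("0", "O").replace("1", "l").replace("8", "B")
--     return ''.join(filter(str.isalnum, s))
--
-- def read_race_data(text, list_of_races):
--     race_data = {}
--
--     text_lower = text.lower()
--     if "adjudicated" in text_lower:
--         bookmark = text_lower.find("adjudicated")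
--         text = text[:bookmark]
--
--     lines = text.split("\n")
--
--     # index: sanitized race form -> races carrying that form, in list order
--     index = {}
--     for race in list_of_races:
--         index.setdefault(_sanitize(race), []).append(race)
--
--     # one pass over the lines; each line is sanitized once and looked up
--     for i, line in enumerate(lines):
--         bucket = index.get(_sanitize(line))
--         if bucket is not None:
--             for race in bucket:
--                 race_data[race] = lines[i + 1][:6]
--
--     return race_data
-- ===== Notes on version B (the rewrite author's own statement) =====
-- stated objective: faster
-- what changed: Replaces the nested lines-by-races scan, which re-sanitizes every race for every line, with a prebuilt dict from sanitized race form to its races and a single pass over the lines that sanitizes each line once and looks it up, preserving insertion order and the last-match overwrite.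
import Mathlib
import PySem

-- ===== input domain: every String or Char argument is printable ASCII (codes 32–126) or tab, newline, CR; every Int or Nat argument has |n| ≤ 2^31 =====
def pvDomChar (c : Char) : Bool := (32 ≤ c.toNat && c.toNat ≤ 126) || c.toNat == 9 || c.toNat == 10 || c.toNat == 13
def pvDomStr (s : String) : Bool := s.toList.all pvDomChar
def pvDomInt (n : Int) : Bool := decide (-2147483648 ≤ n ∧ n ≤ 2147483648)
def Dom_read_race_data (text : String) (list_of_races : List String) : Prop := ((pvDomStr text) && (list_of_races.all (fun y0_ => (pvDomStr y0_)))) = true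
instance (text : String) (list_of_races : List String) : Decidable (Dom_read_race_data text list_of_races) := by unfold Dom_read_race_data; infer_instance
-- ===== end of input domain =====

-- B replaces A's nested lines×races scan (which re-sanitizes every race on every line) by a
-- prebuilt index from sanitized race form to its races plus a single pass over the lines,
-- sanitizing each race and each line once; results and insertion order are identical.

-- shared sanitization chain of both Pythons:  s.replace("5","S")… + ''.join(filter(str.isalnum, s))
def pvSan (s : String) : List Char :=
  (PySem.Str.replace (PySem.Str.replace (PySem.Str.replace (PySem.Str.replace s "5" "S") "0" "O") "1" "l") "8" "B").toList.filter PySem.Chars.isalnum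

-- shared preamble of both Pythons: text after the "adjudicated" truncation, split into lines
def pvLines (text : String) : List String :=
  let text_lower := PySem.Str.lower text
  let text1 := if PySem.Str.isIn "adjudicated" text_lower then
      PySem.Str.slice text none (some (PySem.Str.find text_lower "adjudicated"))
    else text
  (PySem.Str.split? text1 "\n").getD []   -- sep "\n" ≠ "", so split? is always `some`

-- ===== PORT A =====
-- Python's lines[line_index+1] raises IndexError when a matched line is the last one; Pre_
-- excludes exactly those inputs, so the port's `(pyGet? …).getD ""` is never the `none` case.
def read_race_data (text : String) (list_of_races : List String) : List (String × String) :=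
  let lines := pvLines text
  let race_data : PySem.Dict String String :=
    (PySem.List.pyRange 0 lines.length 1).foldl (fun d line_index =>
      list_of_races.foldl (fun d race =>
        let race_sanitized := pvSan race
        let line_sanitized := pvSan (PySem.List.pyGetD lines line_index "")
        if line_sanitized = race_sanitized then
          d.insert race (PySem.Str.slice ((PySem.List.pyGet? lines (line_index + 1)).getD "") none (some 6))
        else d) d)
      PySem.Dict.empty
  race_data.items

-- ===== PORT B =====
def read_race_data_alt (text : String) (list_of_races : List String) : List (String × String) :=
  let lines := pvLines text
  -- index: sanitized race form -> races carrying that form, in list order (setdefault+append)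
  let index : PySem.Dict (List Char) (List String) :=
    list_of_races.foldl (fun d race => d.insert (pvSan race) (d.getD (pvSan race) [] ++ [race])) PySem.Dict.empty
  -- one pass over the lines; each line is sanitized once and looked up
  let race_data : PySem.Dict String String :=
    (PySem.List.enumerate lines).foldl (fun d p =>
      match index.get? (pvSan p.2) with
      | none => d
      | some bucket => bucket.foldl (fun d race =>
          d.insert race (PySem.Str.slice ((PySem.List.pyGet? lines (p.1 + 1)).getD "") none (some 6))) d)
      PySem.Dict.empty
  race_data.items

-- ===== PRECONDITION & SPEC =====
-- Pre_ excludes exactly the inputs on which Python A raises IndexError: those where the LAST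
-- line (after the "adjudicated" truncation) sanitizes equal to some race, so lines[i+1] is
-- read past the end.  Python B raises there too; nothing else is excluded.
def Pre_read_race_data (text : String) (list_of_races : List String) : Prop :=
  ∀ race ∈ list_of_races, pvSan ((pvLines text).getLastD "") ≠ pvSan race
instance (text : String) (list_of_races : List String) : Decidable (Pre_read_race_data text list_of_races) := by unfold Pre_read_race_data; infer_instance

def pvWitness_read_race_data : String × List String := ("GOV 1\n  YES  \ntrail", ["GOV-l!"])

def Spec_read_race_data (text : String) (list_of_races : List String) (out : List (String × String)) : Prop := out = read_race_data_alt text list_of_races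
instance (text : String) (list_of_races : List String) (out : List (String × String)) : Decidable (Spec_read_race_data text list_of_races out) := by unfold Spec_read_race_data; infer_instance

-- ===== CLAIM (what is proved, stated in full; the proofs are below) =====
def Claim_equal_read_race_data : Prop := ∀ (text : String) (list_of_races : List String), Dom_read_race_data text list_of_races → Pre_read_race_data text list_of_races → Spec_read_race_data text list_of_races (read_race_data text list_of_races)

-- ===== LEMMAS AND PROOFS =====

-- B's index, looked up at key k, holds exactly the races whose sanitized form is k, in order.
theorem pvIndex_get?_gen (races : List String) (d0 : PySem.Dict (List Char) (List String)) (k : List Char) :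
    (races.foldl (fun d race => d.insert (pvSan race) (d.getD (pvSan race) [] ++ [race])) d0).get? k
      = match races.filter (fun r => pvSan r == k) with
        | [] => d0.get? k
        | l => some (d0.getD k [] ++ l) := by
  induction races generalizing d0 with
  | nil => simp
  | cons r rest ih =>
    simp only [List.foldl_cons, List.filter_cons]
    by_cases h : pvSan r = k
    · subst h
      rw [ih]
      have hgd : (d0.insert (pvSan r) (d0.getD (pvSan r) [] ++ [r])).getD (pvSan r) []
          = d0.getD (pvSan r) [] ++ [r] := by
        rw [PySem.Dict.getD_insert]; simp
      cases hf : rest.filter (fun x => pvSan x == pvSan r) with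
      | nil => simp [PySem.Dict.get?_insert_self]
      | cons a l => simp [hgd]
    · have hb : (pvSan r == k) = false := by simp [h]
      rw [ih]
      have hne : k ≠ pvSan r := fun hh => h hh.symm
      have hgd : (d0.insert (pvSan r) (d0.getD (pvSan r) [] ++ [r])).getD k []
          = d0.getD k [] := by rw [PySem.Dict.getD_insert]; simp [hne]
      cases hf : rest.filter (fun x => pvSan x == k) with
      | nil => simp [hb, PySem.Dict.get?_insert_of_ne _ _ hne]
      | cons a l => simp [hb, hgd]

-- A's inner loop over the races at one line equals B's bucket lookup + insertions there.
theorem pvLine_step (races : List String) (line : String) (v : String)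
    (d : PySem.Dict String String) :
    (races.foldl (fun d race =>
        if pvSan line = pvSan race then d.insert race v else d) d)
    = (match (races.foldl (fun d race => d.insert (pvSan race) (d.getD (pvSan race) [] ++ [race])) (PySem.Dict.empty)).get? (pvSan line) with
       | none => d
       | some bucket => bucket.foldl (fun d race => d.insert race v) d) := by
  rw [pvIndex_get?_gen]
  have hfun : (fun (d : PySem.Dict String String) race =>
        if pvSan line = pvSan race then d.insert race v else d)
      = (fun d race => if (pvSan race == pvSan line) = true then d.insert race v else d) := by
    funext d r
    by_cases h : pvSan line = pvSan r
    · simp [h]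
    · have h2 : pvSan r ≠ pvSan line := fun hh => h hh.symm
      simp [h, h2]
  rw [hfun, ← List.foldl_filter]
  cases hf : races.filter (fun r => pvSan r == pvSan line) with
  | nil => simp
  | cons a l => simp [PySem.Dict.getD, PySem.Dict.get?_empty]

theorem pvEnum_aux (lines : List String) (s : Int) :
    PySem.List.enumerate lines s
      = (List.range lines.length).map (fun (k : Nat) => ((s + k : Int), lines.getD k "")) := by
  induction lines generalizing s with
  | nil => simp [PySem.List.enumerate]
  | cons x xs ih =>
    simp only [PySem.List.enumerate_cons, List.length_cons, List.range_succ_eq_map,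
      List.map_cons, List.map_map, ih (s + 1)]
    congr 1
    · simp
    · apply List.map_congr_left
      intro k _
      simp only [Function.comp_apply, List.getD_cons_succ, Prod.mk.injEq]
      constructor
      · push_cast; ring
      · trivial

-- B's enumerate(lines) is A's index loop paired with the indexed element.
theorem pvEnum (lines : List String) :
    PySem.List.enumerate lines
      = (PySem.List.pyRange 0 (lines.length) 1).map
          (fun i => (i, PySem.List.pyGetD lines i "")) := by
  rw [pvEnum_aux, PySem.List.pyRange_one, List.map_map]
  apply List.map_congr_left
  intro k _
  simp [Function.comp, PySem.List.pyGetD_natCast]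

theorem pvPorts_eq (text : String) (list_of_races : List String) :
    read_race_data text list_of_races = read_race_data_alt text list_of_races := by
  simp only [read_race_data, read_race_data_alt]
  apply congrArg PySem.Dict.items
  rw [pvEnum, List.foldl_map]
  apply congrArg (fun F => List.foldl F PySem.Dict.empty (PySem.List.pyRange 0 ((pvLines text).length) 1))
  funext d i
  simpa using pvLine_step list_of_races (PySem.List.pyGetD (pvLines text) i "")
    (PySem.Str.slice ((PySem.List.pyGet? (pvLines text) (i + 1)).getD "") none (some 6)) d

-- ===== VERDICT (by name: the statement is the Claim_ definition above) =====
theorem read_race_data_spec : Claim_equal_read_race_data := by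
  intro text list_of_races _ _
  unfold Spec_read_race_data
  exact pvPorts_eq text list_of_races
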